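-- pv_equiv track=rewrite | github.com/RazerM/advent-of-code-2017 | aoc_py/day1-1.py | captcha
-- ===== SOURCE A (Python) =====
-- def captcha(iterable):
--     iterator = iter(iterable)
--     sentinel = object()
--     current = next(iterator, sentinel)
--
--     # First digit is after the last, yield as ahead at the end
--     first = current
--
--     while current is not sentinel:
--         ahead = next(iterator, sentinel)
--         if ahead is sentinel:
--             yield current, first
--         else:
--             yield current, ahead
--         current = ahead
-- ===== SOURCE B (Python) =====
-- def captcha(iterable):
--     seq = list(iterable)
--     yield from zip(seq, seq[1:] + seq[:1])
-- ===== Notes on version B (the rewrite author's own statement) =====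
-- stated objective: simpler
-- what changed: Replaces the sentinel/next()-threading iterator loop (tracking first/current/ahead) with materialising the input and zipping it against its one-step rotation seq[1:] + seq[:1].
import Mathlib
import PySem

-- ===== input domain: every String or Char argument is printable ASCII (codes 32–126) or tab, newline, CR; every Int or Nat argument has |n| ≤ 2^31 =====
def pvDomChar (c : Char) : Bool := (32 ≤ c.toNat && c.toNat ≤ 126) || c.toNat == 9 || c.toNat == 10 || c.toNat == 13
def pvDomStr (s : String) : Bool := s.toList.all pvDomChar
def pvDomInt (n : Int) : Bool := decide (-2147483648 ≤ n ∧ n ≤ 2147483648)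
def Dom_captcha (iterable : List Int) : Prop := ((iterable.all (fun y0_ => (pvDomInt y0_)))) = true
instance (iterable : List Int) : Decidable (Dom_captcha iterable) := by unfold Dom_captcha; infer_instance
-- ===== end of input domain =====

-- B replaces A's sentinel/next()-threaded while loop with zipping the list against its one-step rotation (simpler decomposition; same O(n) cost).
-- ===== PORT A =====
-- the while loop of A: 'first' fixed, 'current' threaded, 'rest' the remaining iterator
def captchaGo (first current : Int) (rest : List Int) : List (Int × Int) :=
  match rest with
  | [] => [(current, first)]            -- ahead is sentinel: yield current, first and stop
  | a :: rs => (current, a) :: captchaGo first a rs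

def captcha (iterable : List Int) : List (Int × Int) :=
  match iterable with
  | [] => []                            -- current is sentinel immediately
  | c :: rest => captchaGo c c rest

-- ===== PORT B =====
def captcha_alt (iterable : List Int) : List (Int × Int) :=
  let seq := iterable
  seq.zip (PySem.List.slice seq (some 1) none ++ PySem.List.slice seq none (some 1))

-- ===== PRECONDITION & SPEC =====
def Spec_captcha (iterable : List Int) (out : List (Int × Int)) : Prop := out = captcha_alt iterable
instance (iterable : List Int) (out : List (Int × Int)) : Decidable (Spec_captcha iterable out) := by unfold Spec_captcha; infer_instance

-- ===== CLAIM (what is proved, stated in full; the proofs are below) =====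
def Claim_equal_captcha : Prop := ∀ (iterable : List Int), Dom_captcha iterable → Spec_captcha iterable (captcha iterable)

-- ===== LEMMAS AND PROOFS =====

-- ===== VERDICT (by name: the statement is the Claim_ definition above) =====
-- the loop yields (current::rest) zipped against (rest ++ [first])
theorem captchaGo_eq_zip (rest : List Int) (first current : Int) :
    captchaGo first current rest = (current :: rest).zip (rest ++ [first]) := by
  induction rest generalizing current with
  | nil => simp [captchaGo]
  | cons a rs ih => simp [captchaGo, ih]

theorem captcha_spec : Claim_equal_captcha := by
  intro iterable _
  unfold Spec_captcha captcha captcha_alt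
  cases iterable with
  | nil => simp
  | cons c rest =>
      simp only []
      rw [captchaGo_eq_zip]
      simp [PySem.List.slice]
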